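-- pv_equiv track=rewrite | github.com/synqing/Lightwave-Ledstrip | firmware-v3/src/config/gen_effect_ids.py | make_constant_name
-- ===== SOURCE A (Python) =====
-- def make_constant_name(class_name, display_name):
--     """Generate a C++ constant name from the effect class name."""
--     # Remove Effect/Ref/Instance suffixes
--     name = class_name
--     if name.endswith("Effect"):
--         name = name[:-6]
--     if name.endswith("Ref"):
--         name = name[:-3]
--
--     # Split known consecutive abbreviations before CamelCase conversion
--     # (e.g., LGPRGBPrism -> LGP_RGB_Prism, LGPDNAHelix -> LGP_DNA_Helix)
--     KNOWN_ABBREVS = ['RGB', 'DNA', 'IFS', 'BPM', 'LGP', 'SB', 'ES']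
--     for abbr in sorted(KNOWN_ABBREVS, key=len, reverse=True):
--         # Insert underscore between two adjacent abbreviations
--         for other in KNOWN_ABBREVS:
--             if other == abbr:
--                 continue
--             name = name.replace(abbr + other, abbr + '_' + other)
--
--     # Convert CamelCase to UPPER_SNAKE_CASE
--     result = []
--     for i, ch in enumerate(name):
--         if ch.isupper() and i > 0:
--             prev = name[i - 1]
--             if prev == '_':
--                 pass  # already separated
--             elif prev.islower() or prev.isdigit():
--                 result.append('_')
--             elif i + 1 < len(name) and name[i + 1].islower():
--                 result.append('_')
--         result.append(ch.upper())
--     snake = ''.join(result)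
--
--     # Clean up double underscores and leading/trailing underscores
--     while '__' in snake:
--         snake = snake.replace('__', '_')
--     snake = snake.strip('_')
--
--     return f"EID_{snake}"
-- ===== SOURCE B (Python) =====
-- def make_constant_name(class_name, display_name):
--     """Generate a C++ constant name from the effect class name."""
--     name = class_name
--     if name.endswith("Effect"):
--         name = name[:-6]
--     if name.endswith("Ref"):
--         name = name[:-3]
--
--     # Same abbreviation-splitting phase as before (sorted by length, longest first,
--     # which for this constant list is the list itself).
--     KNOWN_ABBREVS = ['RGB', 'DNA', 'IFS', 'BPM', 'LGP', 'SB', 'ES']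
--     for abbr in KNOWN_ABBREVS:
--         for other in KNOWN_ABBREVS:
--             if other != abbr:
--                 name = name.replace(abbr + other, abbr + '_' + other)
--
--     # Tokenize into word segments instead of inserting/cleaning underscores:
--     # a new word starts at each '_' and at each CamelCase boundary.
--     words = []
--     cur = []
--     prev = None
--     nxts = list(name[1:]) + [None]
--     for ch, nxt in zip(name, nxts):
--         if ch == '_':
--             words.append(cur)
--             cur = []
--         else:
--             if (ch.isupper() and prev is not None and prev != '_'
--                     and (prev.islower() or prev.isdigit()
--                          or (nxt is not None and nxt.islower()))):
--                 words.append(cur)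
--                 cur = []
--             cur.append(ch.upper())
--         prev = ch
--     words.append(cur)
--
--     return "EID_" + "_".join(''.join(w) for w in words if w)
-- ===== Notes on version B (the rewrite author's own statement) =====
-- stated objective: alternative
-- what changed: The char-by-char underscore-inserting scan followed by a whileloop collapsing '__' and a strip('_') is replaced by a single tokenizing pass that splits the name into word segments at '_' and at CamelCase boundaries and joins the non-empty segments with '_', so no cleanup passes are needed.
import Mathlib
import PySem

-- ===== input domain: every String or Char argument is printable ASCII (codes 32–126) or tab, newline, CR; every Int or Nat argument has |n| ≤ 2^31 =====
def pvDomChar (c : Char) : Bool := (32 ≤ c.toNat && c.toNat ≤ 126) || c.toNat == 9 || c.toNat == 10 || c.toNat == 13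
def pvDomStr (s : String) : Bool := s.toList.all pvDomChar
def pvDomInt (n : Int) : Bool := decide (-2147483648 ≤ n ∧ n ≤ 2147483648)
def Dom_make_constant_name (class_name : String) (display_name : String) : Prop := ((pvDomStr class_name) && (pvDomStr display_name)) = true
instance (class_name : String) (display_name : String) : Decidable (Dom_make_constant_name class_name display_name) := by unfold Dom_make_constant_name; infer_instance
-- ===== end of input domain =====

-- B replaces A's underscore-inserting scan + '__'-collapsing/stripping cleanup by a single
-- tokenizing pass into word segments joined with '_' (objective: alternative decomposition).


-- ===== PORT A =====

def knownAbbrevs : List (List Char) :=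
  [['R','G','B'], ['D','N','A'], ['I','F','S'], ['B','P','M'], ['L','G','P'], ['S','B'], ['E','S']]

def stripSuffixA (name : List Char) : List Char :=
  let name := if PySem.Chars.endswith name ['E','f','f','e','c','t'] then PySem.Chars.slice name none (some (-6)) else name
  if PySem.Chars.endswith name ['R','e','f'] then PySem.Chars.slice name none (some (-3)) else name

def abbrevA (name : List Char) : List Char :=
  (PySem.List.sorted knownAbbrevs (fun a => PySem.Chars.len a) true).foldl
    (fun n abbr =>
      knownAbbrevs.foldl
        (fun n other =>
          if other == abbr then n
          else PySem.Chars.replace n (abbr ++ other) (abbr ++ '_' :: other)) n) name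

def insA (prev? : Option Char) (ch : Char) (rest : List Char) : List Char :=
  match prev? with
  | none => []
  | some prev =>
    if PySem.Chars.isupper ch then
      if prev = '_' then []
      else if PySem.Chars.islower prev || PySem.Chars.isdigit prev then ['_']
      else
        match rest with
        | nxt :: _ => if PySem.Chars.islower nxt then ['_'] else []
        | [] => []
    else []

def camelScan : Option Char → List Char → List Char
  | _, [] => []
  | prev?, ch :: rest => insA prev? ch rest ++ PySem.Chars.upperChar ch :: camelScan (some ch) rest

def rColl : List Char → List Char
  | [] => []
  | [c] => [c]
  | c :: d :: t => if c = '_' ∧ d = '_' then '_' :: rColl t else c :: rColl (d :: t)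

theorem rColl_length_le (s : List Char) : (rColl s).length ≤ s.length := by
  fun_induction rColl <;> simp_all
  omega

theorem goRepl_eq_rColl (fuel : Nat) (l acc : List Char) (h : l.length ≤ fuel) :
    PySem.Chars.replace.go ['_','_'] ['_'] fuel l acc = acc.reverse ++ rColl l := by
  induction fuel generalizing l acc with
  | zero =>
    have : l = [] := by cases l <;> simp_all
    subst this
    simp [PySem.Chars.replace.go, rColl]
  | succ fuel ih =>
    match l with
    | [] => simp [PySem.Chars.replace.go, rColl]
    | c :: t =>
      rw [PySem.Chars.replace.go]
      by_cases hp : (['_','_'] : List Char).isPrefixOf (c :: t)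
      · rw [if_pos hp]
        match t, hp with
        | d :: t, hp =>
          have hcd : c = '_' ∧ d = '_' := by
            simp [List.isPrefixOf] at hp
            exact ⟨hp.1.symm, hp.2.symm⟩
          simp only [List.length_cons] at h
          simp only [List.length_cons, List.length_nil, List.drop_succ_cons, List.drop_zero]
          rw [show (['_'] : List Char).reverse ++ acc = '_' :: acc from rfl, ih t ('_' :: acc) (by omega)]
          rw [rColl, if_pos hcd]
          simp
        | [], hp => simp [List.isPrefixOf] at hp
      · rw [if_neg hp]
        rw [ih _ _ (by simp at h; omega)]
        match t with
        | [] => simp [rColl]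
        | d :: t =>
          have hcd : ¬ (c = '_' ∧ d = '_') := by
            intro ⟨h1, h2⟩; subst h1; subst h2; simp [List.isPrefixOf] at hp
          rw [rColl, if_neg hcd]
          simp
theorem replace_eq_rColl (s : List Char) :
    PySem.Chars.replace s ['_','_'] ['_'] = rColl s := by
  rw [PySem.Chars.replace]
  simp [goRepl_eq_rColl s.length s [] le_rfl]

theorem rColl_length_lt (s : List Char) (h : ['_','_'] <:+: s) :
    (rColl s).length < s.length := by
  fun_induction rColl with
  | case1 => exact absurd h.length_le (by simp)
  | case2 c => exact absurd h.length_le (by simp)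
  | case3 c d t hcd ih =>
    have := rColl_length_le t
    simp only [List.length_cons]; omega
  | case4 c d t hcd ih =>
    have hdt : ['_','_'] <:+: d :: t := by
      obtain ⟨u, v, huv⟩ := h
      match u, huv with
      | [], huv =>
        simp at huv
        exact absurd ⟨huv.1.symm, huv.2.1.symm⟩ hcd
      | x :: u, huv =>
        simp at huv
        exact ⟨u, v, by simp [huv.2]⟩
    have := ih hdt
    simp only [List.length_cons] at this ⊢; omega

def collapse (s : List Char) : List Char :=
  if h : PySem.Chars.isIn ['_','_'] s then
    collapse (PySem.Chars.replace s ['_','_'] ['_'])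
  else s
termination_by s.length
decreasing_by
  rw [replace_eq_rColl]
  exact rColl_length_lt s ((PySem.Chars.isIn_iff_infix _ _).mp h)

def make_constant_name (class_name : String) (display_name : String) : String :=
  let name := abbrevA (stripSuffixA class_name.toList)
  let snake := camelScan none name
  let snake := collapse snake
  let snake := PySem.Chars.stripChars snake ['_']
  String.mk ('E' :: 'I' :: 'D' :: '_' :: snake)

-- ===== PORT B =====
def abbrevB (name : List Char) : List Char :=
  knownAbbrevs.foldl
    (fun n abbr =>
      knownAbbrevs.foldl
        (fun n other =>
          if other != abbr then PySem.Chars.replace n (abbr ++ other) (abbr ++ '_' :: other)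
          else n) n) name

def isBoundary (prev? : Option Char) (ch : Char) (rest : List Char) : Bool :=
  PySem.Chars.isupper ch &&
    (match prev? with
     | none => false
     | some prev =>
       prev != '_' &&
         (PySem.Chars.islower prev || PySem.Chars.isdigit prev ||
           (match rest with
            | nxt :: _ => PySem.Chars.islower nxt
            | [] => false)))

def tokenize : Option Char → List Char → List Char → List (List Char)
  | _, cur, [] => [cur]
  | prev?, cur, ch :: rest =>
    if ch = '_' then cur :: tokenize (some ch) [] rest
    else if isBoundary prev? ch rest then cur :: tokenize (some ch) [PySem.Chars.upperChar ch] rest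
    else tokenize (some ch) (cur ++ [PySem.Chars.upperChar ch]) rest

def make_constant_name_alt (class_name : String) (display_name : String) : String :=
  let name := abbrevB (stripSuffixA class_name.toList)
  let toks := tokenize none [] name
  String.mk ('E' :: 'I' :: 'D' :: '_' ::
    PySem.Chars.join ['_'] (toks.filter (fun w => !w.isEmpty)))



-- ===== PRECONDITION & SPEC =====
def Spec_make_constant_name (class_name : String) (display_name : String) (out : String) : Prop := out = make_constant_name_alt class_name display_name
instance (class_name : String) (display_name : String) (out : String) : Decidable (Spec_make_constant_name class_name display_name out) := by unfold Spec_make_constant_name; infer_instance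

-- ===== CLAIM (what is proved, stated in full; the proofs are below) =====
def Claim_equal_make_constant_name : Prop := ∀ (class_name : String) (display_name : String), Dom_make_constant_name class_name display_name → Spec_make_constant_name class_name display_name (make_constant_name class_name display_name)

-- ===== LEMMAS AND PROOFS =====

theorem sorted_abbrevs_eq :
    PySem.List.sorted knownAbbrevs (fun a => PySem.Chars.len a) true = knownAbbrevs := by decide

theorem abbrev_eq (n : List Char) : abbrevA n = abbrevB n := by
  unfold abbrevA abbrevB
  rw [sorted_abbrevs_eq]
  rfl

def mySplit : List Char → List (List Char)
  | [] => [[]]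
  | c :: t =>
    if c = '_' then [] :: mySplit t
    else
      match mySplit t with
      | g :: gs => (c :: g) :: gs
      | [] => [[c]]

theorem mySplit_ne_nil (s : List Char) : mySplit s ≠ [] := by
  cases s with
  | nil => simp [mySplit]
  | cons c t =>
    rw [mySplit]
    split
    · simp
    · split <;> simp

def wordsU (s : List Char) : List (List Char) := (mySplit s).filter (fun w => !w.isEmpty)

def consH (cur : List Char) : List (List Char) → List (List Char)
  | [] => [cur]
  | g :: gs => (cur ++ g) :: gs

theorem upperChar_und : PySem.Chars.upperChar '_' = '_' := rfl

theorem isupper_und : PySem.Chars.isupper '_' = false := rfl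

theorem upperChar_ne (c : Char) (h : c ≠ '_') : PySem.Chars.upperChar c ≠ '_' := by
  unfold PySem.Chars.upperChar
  split
  · rename_i hl
    intro hc
    have hb : 97 ≤ c.toNat ∧ c.toNat ≤ 122 := by simpa [PySem.Chars.islower, Char.le_def] using hl
    have hv : (c.toNat - 32).isValidChar := Or.inl (by omega)
    have h2 := congrArg Char.toNat hc
    rw [Char.toNat_ofNat] at h2
    simp [hv] at h2
    have h3 : ('_').toNat = 95 := rfl
    omega
  · exact h

theorem insA_underscore (prev? : Option Char) (rest : List Char) : insA prev? '_' rest = [] := by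
  cases prev? <;> simp [insA, isupper_und]

theorem insA_eq_boundary (prev? : Option Char) (ch : Char) (rest : List Char) :
    insA prev? ch rest = if isBoundary prev? ch rest then ['_'] else [] := by
  cases prev? with
  | none => simp [insA, isBoundary]
  | some prev =>
    by_cases hu : PySem.Chars.isupper ch = true
    · by_cases hp : prev = '_'
      · simp [insA, isBoundary, hu, hp]
      · by_cases hld : (PySem.Chars.islower prev || PySem.Chars.isdigit prev) = true
        · simp [insA, isBoundary, hu, hp, hld]
        · cases rest with
          | nil => simp [insA, isBoundary, hu, hp, hld]
          | cons nxt r =>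
            by_cases hn : PySem.Chars.islower nxt = true
            · simp [insA, isBoundary, hu, hp, hld, hn]
            · simp [insA, isBoundary, hu, hp, hld, hn]
    · simp [insA, isBoundary, hu]

theorem tokenize_eq (s : List Char) : ∀ (prev? : Option Char) (cur : List Char),
    tokenize prev? cur s = consH cur (mySplit (camelScan prev? s)) := by
  induction s with
  | nil => intro prev? cur; simp [tokenize, camelScan, mySplit, consH]
  | cons ch rest ih =>
    intro prev? cur
    by_cases hch : ch = '_'
    · subst hch
      rw [tokenize, if_pos rfl, ih]
      rw [camelScan, insA_underscore, upperChar_und]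
      simp only [List.nil_append]
      rw [show mySplit ('_' :: camelScan (some '_') rest) = [] :: mySplit (camelScan (some '_') rest) from by rw [mySplit]; simp]
      obtain ⟨g, gs, hg⟩ : ∃ g gs, mySplit (camelScan (some '_') rest) = g :: gs := by
        cases hm : mySplit (camelScan (some '_') rest) with
        | nil => exact absurd hm (mySplit_ne_nil _)
        | cons g gs => exact ⟨g, gs, rfl⟩
      rw [hg]
      simp [consH]
    · have huc := upperChar_ne ch hch
      rw [camelScan, insA_eq_boundary]
      obtain ⟨g, gs, hg⟩ : ∃ g gs, mySplit (camelScan (some ch) rest) = g :: gs := by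
        cases hm : mySplit (camelScan (some ch) rest) with
        | nil => exact absurd hm (mySplit_ne_nil _)
        | cons g gs => exact ⟨g, gs, rfl⟩
      rw [tokenize, if_neg hch]
      by_cases hb : isBoundary prev? ch rest = true
      · simp only [hb, if_true]
        rw [ih]
        rw [show ((['_'] : List Char) ++ PySem.Chars.upperChar ch :: camelScan (some ch) rest)
              = '_' :: PySem.Chars.upperChar ch :: camelScan (some ch) rest from rfl]
        rw [show mySplit ('_' :: PySem.Chars.upperChar ch :: camelScan (some ch) rest)
              = [] :: mySplit (PySem.Chars.upperChar ch :: camelScan (some ch) rest) from by rw [mySplit]; simp]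
        rw [show mySplit (PySem.Chars.upperChar ch :: camelScan (some ch) rest)
              = (PySem.Chars.upperChar ch :: g) :: gs from by rw [mySplit, if_neg huc, hg]]
        rw [hg]
        simp [consH]
      · simp only [hb, Bool.false_eq_true, if_false, List.nil_append]
        rw [ih]
        rw [show mySplit (PySem.Chars.upperChar ch :: camelScan (some ch) rest)
              = (PySem.Chars.upperChar ch :: g) :: gs from by rw [mySplit, if_neg huc, hg]]
        rw [hg]
        simp [consH, List.append_assoc]

theorem wordsU_nil : wordsU [] = [] := by simp [wordsU, mySplit]

theorem wordsU_und (t : List Char) : wordsU ('_' :: t) = wordsU t := by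
  simp [wordsU, mySplit]

theorem mySplit_cons_ne (c : Char) (t : List Char) (hc : c ≠ '_') :
    ∃ g gs, mySplit t = g :: gs ∧ mySplit (c :: t) = (c :: g) :: gs := by
  cases hm : mySplit t with
  | nil => exact absurd hm (mySplit_ne_nil t)
  | cons g gs => exact ⟨g, gs, rfl, by rw [mySplit, if_neg hc, hm]⟩

theorem headI_mySplit_rColl (t : List Char) : (mySplit (rColl t)).headI = (mySplit t).headI := by
  fun_induction rColl with
  | case1 => rfl
  | case2 c => rfl
  | case3 c d t hcd ih =>
    obtain ⟨h1, h2⟩ := hcd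
    subst h1; subst h2
    have h1 : ∀ u, (mySplit ('_' :: u)).headI = [] := by intro u; rw [mySplit, if_pos rfl]; rfl
    rw [h1, h1]
  | case4 c d t hcd ih =>
    by_cases hc : c = '_'
    · subst hc
      have h1 : ∀ u, (mySplit ('_' :: u)).headI = [] := by intro u; rw [mySplit, if_pos rfl]; rfl
      rw [h1, h1]
    · obtain ⟨g, gs, hg, hcg⟩ := mySplit_cons_ne c (rColl (d :: t)) hc
      obtain ⟨g', gs', hg', hcg'⟩ := mySplit_cons_ne c (d :: t) hc
      rw [hcg, hcg']
      simp only [List.headI]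
      have := ih
      rw [hg, hg'] at this
      simp only [List.headI] at this
      rw [this]

theorem wordsU_rColl (s : List Char) : wordsU (rColl s) = wordsU s := by
  fun_induction rColl with
  | case1 => rfl
  | case2 c => rfl
  | case3 c d t hcd ih =>
    obtain ⟨h1, h2⟩ := hcd
    subst h1; subst h2
    rw [wordsU_und, wordsU_und, wordsU_und, ih]
  | case4 c d t hcd ih =>
    by_cases hc : c = '_'
    · subst hc
      rw [wordsU_und, wordsU_und, ih]
    · obtain ⟨g, gs, hg, hcg⟩ := mySplit_cons_ne c (rColl (d :: t)) hc
      obtain ⟨g', gs', hg', hcg'⟩ := mySplit_cons_ne c (d :: t) hc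
      have hgg : g = g' := by
        have := headI_mySplit_rColl (d :: t)
        rw [hg, hg'] at this
        simpa using this
      subst hgg
      have htail : gs.filter (fun w => !w.isEmpty) = gs'.filter (fun w => !w.isEmpty) := by
        unfold wordsU at ih
        rw [hg, hg'] at ih
        by_cases hge : g.isEmpty = true
        · simpa [List.filter_cons, hge] using ih
        · simp [List.filter_cons, hge, List.cons.injEq] at ih
          exact ih
      unfold wordsU
      rw [hcg, hcg']
      simp [List.filter_cons, htail]

def pU : Char → Bool := fun c => (['_'] : List Char).contains c

def rstripU (s : List Char) : List Char := (List.dropWhile pU s.reverse).reverse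

theorem stripChars_eq (s : List Char) :
    PySem.Chars.stripChars s ['_'] = rstripU (List.dropWhile pU s) := rfl

def JU : List (List Char) → List Char := List.intercalate ['_']

theorem JU_nil : JU [] = [] := by simp [JU, List.intercalate]
theorem JU_single (w : List Char) : JU [w] = w := by simp [JU, List.intercalate]
theorem JU_cons_cons (w x : List Char) (ws : List (List Char)) :
    JU (w :: x :: ws) = w ++ '_' :: JU (x :: ws) := by
  simp [JU, List.intercalate, List.intersperse]

theorem JU_ne_nil (w : List Char) (ws : List (List Char)) (hw : w ≠ []) :
    JU (w :: ws) ≠ [] := by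
  cases ws with
  | nil => rw [JU_single]; exact hw
  | cons x ws => rw [JU_cons_cons]; cases w with | nil => exact absurd rfl hw | cons a u => simp

theorem rstripU_cons (a : Char) (X : List Char) :
    rstripU (a :: X) = if rstripU X = [] then (if a = '_' then [] else [a]) else a :: rstripU X := by
  unfold rstripU
  rw [List.reverse_cons, List.dropWhile_append]
  by_cases h : List.dropWhile pU X.reverse = []
  · rw [h]
    simp only [List.isEmpty_nil, if_true, List.reverse_nil, if_pos rfl]
    by_cases ha : a = '_'
    · simp [List.dropWhile, pU, ha]
    · simp [List.dropWhile, pU, ha]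
  · have hne : (List.dropWhile pU X.reverse).isEmpty = false := by simpa [List.isEmpty_iff] using h
    rw [hne]
    simp only [Bool.false_eq_true, if_false]
    rw [if_neg (by simpa [List.reverse_eq_nil_iff] using h)]
    simp

theorem JU_cons_head (a : Char) (w : List Char) (ws : List (List Char)) :
    JU ((a :: w) :: ws) = a :: JU (w :: ws) := by
  cases ws with
  | nil => rw [JU_single, JU_single]
  | cons x ws => rw [JU_cons_cons, JU_cons_cons]; simp

theorem wordsU_mem_ne_nil (t : List Char) (w : List Char) (hw : w ∈ wordsU t) : w ≠ [] := by
  have := List.of_mem_filter hw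
  simpa [List.isEmpty_iff] using this

theorem infix_of_cons {c : Char} {u : List Char} (h : ['_','_'] <:+: u) : ['_','_'] <:+: c :: u :=
  h.trans (List.suffix_cons c u).isInfix

theorem mid (t : List Char) (hnd : ¬ (['_','_'] <:+: t)) :
    rstripU t = (if t.head? = some '_' ∧ wordsU t ≠ [] then ['_'] else []) ++ JU (wordsU t) := by
  induction t with
  | nil => simp [rstripU, wordsU_nil, JU_nil]
  | cons c u ih =>
    have hndu : ¬ (['_','_'] <:+: u) := fun h => hnd (infix_of_cons h)
    rw [rstripU_cons]
    by_cases hc : c = '_'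
    · subst hc
      have hu : u.head? ≠ some '_' := by
        intro h
        cases u with
        | nil => simp at h
        | cons d v =>
          simp at h
          subst h
          exact hnd ⟨[], v, rfl⟩
      have ihu : rstripU u = JU (wordsU u) := by
        rw [ih hndu, if_neg (by rintro ⟨h1, _⟩; exact hu h1)]
        simp
      rw [wordsU_und]
      cases hw : wordsU u with
      | nil =>
        rw [if_pos (by rw [ihu, hw, JU_nil])]
        simp [JU_nil]
      | cons w ws =>
        have hwne : w ≠ [] := wordsU_mem_ne_nil u w (by rw [hw]; exact List.mem_cons_self)
        have hju : JU (wordsU u) ≠ [] := by rw [hw]; exact JU_ne_nil w ws hwne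
        rw [if_neg (by rw [ihu]; exact hju), ihu, hw]
        rw [if_pos ⟨rfl, by simp⟩]
        simp
    · rw [if_neg (show ¬(((c :: u).head? = some '_') ∧ wordsU (c :: u) ≠ []) from by
        rintro ⟨h1, _⟩; simp at h1; exact hc h1)]
      simp only [List.nil_append]
      obtain ⟨g, gs, hg, hcg⟩ := mySplit_cons_ne c u hc
      have hwcu : wordsU (c :: u) = (c :: g) :: gs.filter (fun w => !w.isEmpty) := by
        unfold wordsU
        rw [hcg]
        simp [List.filter_cons]
      cases u with
      | nil =>
        have : g = [] ∧ gs = [] := by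
          simp [mySplit] at hg
          exact hg
        obtain ⟨h1, h2⟩ := this
        subst h1; subst h2
        rw [if_pos (by simp [rstripU])]
        rw [if_neg hc, hwcu]
        simp [JU_single]
      | cons d v =>
        by_cases hd : d = '_'
        · subst hd
          have hgnil : g = [] ∧ gs = mySplit v := by
            rw [mySplit, if_pos rfl] at hg
            exact ⟨(List.cons.injEq _ _ _ _ ▸ hg).1.symm, ((List.cons.injEq _ _ _ _).mp hg).2.symm⟩
          obtain ⟨h1, h2⟩ := hgnil
          subst h1
          have hfil : gs.filter (fun w => !w.isEmpty) = wordsU v := by rw [h2]; rfl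
          have hwu : wordsU ('_' :: v) = wordsU v := wordsU_und v
          have hvhead : v.head? ≠ some '_' := by
            intro h
            cases v with
            | nil => simp at h
            | cons e w =>
              simp at h; subst h
              exact hndu ⟨[], w, rfl⟩
          have ihu : rstripU ('_' :: v) = (if wordsU v ≠ [] then ['_'] else []) ++ JU (wordsU v) := by
            rw [ih hndu, hwu]
            simp
          cases hw : wordsU v with
          | nil =>
            rw [hwcu, hfil, hw]
            rw [if_pos (by rw [ihu, hw, JU_nil]; simp)]
            rw [if_neg hc]
            simp [JU_single]
          | cons w ws =>
            have hwne : w ≠ [] := wordsU_mem_ne_nil v w (by rw [hw]; exact List.mem_cons_self)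
            have hju : JU (wordsU v) ≠ [] := by rw [hw]; exact JU_ne_nil w ws hwne
            have hrs : rstripU ('_' :: v) = '_' :: JU (wordsU v) := by
              rw [ihu, if_pos (by rw [hw]; simp)]
              simp
            rw [if_neg (by rw [hrs]; simp)]
            rw [hrs, hwcu, hfil, hw]
            rw [JU_cons_head]
            rw [show JU ([] :: w :: ws) = '_' :: JU (w :: ws) from by rw [JU_cons_cons]; simp]
        · obtain ⟨g', gs', hg', hcg'⟩ := mySplit_cons_ne d v hd
          have hgdv : g = d :: g' ∧ gs = gs' := by
            rw [hcg'] at hg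
            have h2 := (List.cons.injEq _ _ _ _).mp hg
            exact ⟨h2.1.symm, h2.2.symm⟩
          obtain ⟨h1, h2⟩ := hgdv
          subst h1; subst h2
          have hwdv : wordsU (d :: v) = (d :: g') :: gs.filter (fun w => !w.isEmpty) := by
            unfold wordsU
            rw [hcg']
            simp [List.filter_cons]
          have ihu : rstripU (d :: v) = JU (wordsU (d :: v)) := by
            rw [ih hndu, if_neg (show ¬(((d :: v).head? = some '_') ∧ wordsU (d :: v) ≠ []) from by
              rintro ⟨hh, _⟩; simp at hh; exact hd hh)]
            simp
          have hne : rstripU (d :: v) ≠ [] := by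
            rw [ihu, hwdv]
            exact JU_ne_nil _ _ (by simp)
          rw [if_neg hne, ihu, hwcu, hwdv, JU_cons_head]
          rw [show JU ((c :: d :: g') :: List.filter (fun w => !w.isEmpty) gs)
                = c :: d :: JU (g' :: List.filter (fun w => !w.isEmpty) gs) from by
              rw [JU_cons_head, JU_cons_head]]

theorem wordsU_dropWhile (s : List Char) : wordsU (List.dropWhile pU s) = wordsU s := by
  induction s with
  | nil => rfl
  | cons c t ih =>
    by_cases hc : c = '_'
    · subst hc
      rw [List.dropWhile_cons_of_pos (by simp [pU]), ih, wordsU_und]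
    · rw [List.dropWhile_cons_of_neg (by simp [pU, hc])]

theorem head?_dropWhile_pU (s : List Char) : (List.dropWhile pU s).head? ≠ some '_' := by
  induction s with
  | nil => simp
  | cons c t ih =>
    by_cases hc : c = '_'
    · subst hc
      rw [List.dropWhile_cons_of_pos (by simp [pU])]
      exact ih
    · rw [List.dropWhile_cons_of_neg (by simp [pU, hc])]
      simpa using hc

theorem strip_collapse (s : List Char) :
    PySem.Chars.stripChars (collapse s) ['_'] = JU (wordsU s) := by
  suffices H : ∀ n (s : List Char), s.length ≤ n →
      PySem.Chars.stripChars (collapse s) ['_'] = JU (wordsU s) from H s.length s le_rfl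
  intro n
  induction n with
  | zero =>
    intro s hs
    have : s = [] := by cases s <;> simp_all
    subst this
    rw [show collapse [] = [] from by rw [collapse]; rfl]
    simp [wordsU_nil, JU_nil]
    rfl
  | succ n ih =>
    intro s hs
    rw [collapse]
    by_cases h : PySem.Chars.isIn ['_','_'] s = true
    · rw [dif_pos h, replace_eq_rColl]
      have hlt := rColl_length_lt s ((PySem.Chars.isIn_iff_infix _ _).mp h)
      rw [ih (rColl s) (by omega), wordsU_rColl]
    · rw [dif_neg h]
      have hni : ¬ (['_','_'] <:+: s) := fun hi => h ((PySem.Chars.isIn_iff_infix _ _).mpr hi)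
      have hnu : ¬ (['_','_'] <:+: List.dropWhile pU s) :=
        fun hi => hni (hi.trans (List.dropWhile_suffix pU).isInfix)
      rw [stripChars_eq, mid _ hnu]
      rw [if_neg (show ¬(((List.dropWhile pU s).head? = some '_') ∧ wordsU (List.dropWhile pU s) ≠ []) from by
        rintro ⟨h1, _⟩; exact head?_dropWhile_pU s h1)]
      rw [wordsU_dropWhile]
      simp

theorem mainList (name : List Char) :
    PySem.Chars.stripChars (collapse (camelScan none name)) ['_'] =
      PySem.Chars.join ['_'] ((tokenize none [] name).filter (fun w => !w.isEmpty)) := by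
  rw [tokenize_eq]
  obtain ⟨g, gs, hg⟩ : ∃ g gs, mySplit (camelScan none name) = g :: gs := by
    cases hm : mySplit (camelScan none name) with
    | nil => exact absurd hm (mySplit_ne_nil _)
    | cons g gs => exact ⟨g, gs, rfl⟩
  rw [hg]
  rw [show consH [] (g :: gs) = g :: gs from by simp [consH]]
  rw [strip_collapse]
  unfold wordsU
  rw [hg]
  rfl

theorem main_eq (class_name display_name : String) :
    make_constant_name class_name display_name = make_constant_name_alt class_name display_name := by
  show String.mk ('E' :: 'I' :: 'D' :: '_' ::
      PySem.Chars.stripChars (collapse (camelScan none (abbrevA (stripSuffixA class_name.toList)))) ['_'])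
    = String.mk ('E' :: 'I' :: 'D' :: '_' ::
      PySem.Chars.join ['_']
        ((tokenize none [] (abbrevB (stripSuffixA class_name.toList))).filter (fun w => !w.isEmpty)))
  rw [← abbrev_eq, mainList]

-- ===== VERDICT (by name: the statement is the Claim_ definition above) =====
theorem make_constant_name_spec : Claim_equal_make_constant_name := by
  intro class_name display_name _
  unfold Spec_make_constant_name
  exact main_eq class_name display_name
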